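-- pv_equiv track=rewrite | github.com/gkulak678/BirthData | dashboard_app.py | _match_required_fields
-- ===== SOURCE A (Python) =====
-- def _normalize_col_name(name):
--     name = str(name).strip().lower().replace(" ", "_")
--     while "__" in name:
--         name = name.replace("__", "_")
--     return name
--
-- def _canonical_key(name):
--     normalized = _normalize_col_name(name)
--     return "".join(ch for ch in normalized if ch.isalnum())
--
-- def _match_required_fields(columns):
--     logical_fields = [
--         "state_of_residence",
--         "month",
--         "month_code",
--         "year_code",
--         "sex_of_infant",
--         "births",
--     ]
--
--     alias_map = {
--         "state_of_residence": {
--             "stateofresidence",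
--             "stateresidence",
--             "residencestate",
--             "state",
--         },
--         "month": {"month"},
--         "month_code": {"monthcode"},
--         "year_code": {"yearcode"},
--         "sex_of_infant": {
--             "sexofinfant",
--             "infantsex",
--             "sex",
--             "gender",
--             "infantgender",
--         },
--         "births": {
--             "births",
--             "birthcount",
--             "birthcounts",
--             "numberofbirths",
--             "livebirths",
--             "totalbirths",
--         },
--     }
--
--     canonical_to_cols = {}
--     for col in columns:
--         ck = _canonical_key(col)
--         canonical_to_cols.setdefault(ck, []).append(col)
--
--     matched = {}
--     for field in logical_fields:
--         if field in columns:
--             matched[field] = field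
--             continue
--
--         target_ck = _canonical_key(field)
--         candidates = []
--
--         if target_ck in canonical_to_cols:
--             candidates.extend(canonical_to_cols[target_ck])
--
--         for alias_ck in alias_map.get(field, set()):
--             if alias_ck in canonical_to_cols:
--                 candidates.extend(canonical_to_cols[alias_ck])
--
--         deduped = []
--         seen = set()
--         for c in candidates:
--             if c not in seen:
--                 deduped.append(c)
--                 seen.add(c)
--
--         if len(deduped) == 1:
--             matched[field] = deduped[0]
--
--     missing = [f for f in logical_fields if f not in matched]
--     return matched, missing
-- ===== SOURCE B (Python) =====
-- _LOGICAL_FIELDS = [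
--     "state_of_residence",
--     "month",
--     "month_code",
--     "year_code",
--     "sex_of_infant",
--     "births",
-- ]
--
-- _ALIAS_MAP = {
--     "state_of_residence": {
--         "stateofresidence",
--         "stateresidence",
--         "residencestate",
--         "state",
--     },
--     "month": {"month"},
--     "month_code": {"monthcode"},
--     "year_code": {"yearcode"},
--     "sex_of_infant": {
--         "sexofinfant",
--         "infantsex",
--         "sex",
--         "gender",
--         "infantgender",
--     },
--     "births": {
--         "births",
--         "birthcount",
--         "birthcounts",
--         "numberofbirths",
--         "livebirths",
--         "totalbirths",
--     },
-- }
--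
--
-- def _normalize_col_name(name):
--     name = str(name).strip().lower().replace(" ", "_")
--     while "__" in name:
--         name = name.replace("__", "_")
--     return name
--
--
-- def _canonical_key(name):
--     normalized = _normalize_col_name(name)
--     return "".join(ch for ch in normalized if ch.isalnum())
--
--
-- def _match_required_fields(columns):
--     # One direct pass over the columns per logical field; no inverted index,
--     # no candidate list with a separate dedup pass.
--     matched = {}
--     for field in _LOGICAL_FIELDS:
--         if field in columns:
--             matched[field] = field
--             continue
--         acceptable = {_canonical_key(field)} | _ALIAS_MAP.get(field, set())
--         collected = []
--         seen = set()
--         for col in columns: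
--             if _canonical_key(col) in acceptable and col not in seen:
--                 collected.append(col)
--                 seen.add(col)
--         if len(collected) == 1:
--             matched[field] = collected[0]
--     missing = [f for f in _LOGICAL_FIELDS if f not in matched]
--     return matched, missing
-- ===== Notes on version B (the rewrite author's own statement) =====
-- stated objective: simpler
-- what changed: B drops A's inverted canonical-key index, per-field candidate list and separate dedup pass, and instead does one direct seen-filtered scan of the columns per logical field, assigning a column when exactly one distinct column canonicalizes into the field's acceptable key set.
import Mathlib
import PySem

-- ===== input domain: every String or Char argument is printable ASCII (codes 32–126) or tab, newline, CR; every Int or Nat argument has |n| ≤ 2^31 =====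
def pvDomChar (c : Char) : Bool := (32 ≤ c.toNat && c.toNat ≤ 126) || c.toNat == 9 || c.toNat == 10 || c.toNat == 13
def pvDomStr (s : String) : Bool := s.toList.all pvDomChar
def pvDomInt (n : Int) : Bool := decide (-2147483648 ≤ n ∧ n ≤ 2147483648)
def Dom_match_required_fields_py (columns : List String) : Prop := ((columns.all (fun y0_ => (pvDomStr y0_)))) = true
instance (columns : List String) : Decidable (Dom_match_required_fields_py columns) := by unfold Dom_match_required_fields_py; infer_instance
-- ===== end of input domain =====

-- B replaces A's inverted canonical-key index plus candidate/dedup passes by one direct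
-- seen-filtered scan of the columns per logical field (objective: simpler).

-- ===== PORT A =====
-- shared helpers (identical source in Source A and Source B): _normalize_col_name / _canonical_key.
-- 'while "__" in name' is ported with fuel = length of the string: each replace of a present
-- "__" strictly shortens the string, so the fuel can never run out.
def collapseDunder : Nat → List Char → List Char
  | 0, s => s
  | fuel + 1, s =>
      if PySem.Chars.isIn ['_', '_'] s then
        collapseDunder fuel (PySem.Chars.replace s ['_', '_'] ['_'])
      else s

def canonicalKey (name : String) : String :=
  let n0 := PySem.Chars.replace (PySem.Chars.lower (PySem.Chars.strip name.toList)) [' '] ['_']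
  let n := collapseDunder n0.length n0
  String.ofList (n.filter (fun ch => PySem.Chars.isalnum ch))

def logicalFields : List String :=
  ["state_of_residence", "month", "month_code", "year_code", "sex_of_infant", "births"]

def aliasMap : PySem.Dict String (PySem.Set String) :=
  PySem.Dict.ofList
    [("state_of_residence",
        PySem.Set.ofList ["stateofresidence", "stateresidence", "residencestate", "state"]),
     ("month", PySem.Set.ofList ["month"]),
     ("month_code", PySem.Set.ofList ["monthcode"]),
     ("year_code", PySem.Set.ofList ["yearcode"]),
     ("sex_of_infant",
        PySem.Set.ofList ["sexofinfant", "infantsex", "sex", "gender", "infantgender"]),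
     ("births",
        PySem.Set.ofList ["births", "birthcount", "birthcounts", "numberofbirths",
                          "livebirths", "totalbirths"])]

-- 'canonical_to_cols' built by setdefault(ck, []).append(col)
def buildC2C (columns : List String) : PySem.Dict String (List String) :=
  columns.foldl (fun d col => d.modify (canonicalKey col) [] (fun l => l ++ [col]))
    PySem.Dict.empty

-- the body of A's 'for field in logical_fields' loop
def stepA (c2c : PySem.Dict String (List String)) (columns : List String)
    (m : PySem.Dict String String) (field : String) : PySem.Dict String String :=
  if columns.contains field then m.insert field field
  else
    let tck := canonicalKey field
    let cands : List String := if c2c.contains tck then [] ++ c2c.getD tck [] else []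
    let cands := (aliasMap.getD field []).foldl
      (fun acc a => if c2c.contains a then acc ++ c2c.getD a [] else acc) cands
    let ded := (cands.foldl
      (fun (p : List String × PySem.Set String) c =>
        if PySem.Set.contains p.2 c then p else (p.1 ++ [c], PySem.Set.add p.2 c))
      ([], [])).1
    if ded.length == 1 then m.insert field (PySem.List.pyGetD ded 0 "") else m

def match_required_fields_py (columns : List String) : (List (String × String)) × List String :=
  let c2c := buildC2C columns
  let matched := logicalFields.foldl (stepA c2c columns) PySem.Dict.empty
  (matched.items, logicalFields.filter (fun f => !(matched.contains f)))

-- ===== PORT B =====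
-- the body of B's 'for field in logical_fields' loop: one seen-filtered scan of columns
def stepB (columns : List String)
    (m : PySem.Dict String String) (field : String) : PySem.Dict String String :=
  if columns.contains field then m.insert field field
  else
    let acceptable : PySem.Set String :=
      PySem.Set.ofList (canonicalKey field :: aliasMap.getD field [])
    let collected := (columns.foldl
      (fun (p : List String × PySem.Set String) col =>
        if PySem.Set.contains acceptable (canonicalKey col) && !(PySem.Set.contains p.2 col)
        then (p.1 ++ [col], PySem.Set.add p.2 col) else p)
      ([], [])).1
    match collected with
    | [c] => m.insert field c
    | _ => m

def match_required_fields_py_alt (columns : List String) : (List (String × String)) × List String :=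
  let matched := logicalFields.foldl (stepB columns) PySem.Dict.empty
  (matched.items, logicalFields.filter (fun f => !(matched.contains f)))

-- ===== PRECONDITION & SPEC =====
def Spec_match_required_fields_py (columns : List String) (out : (List (String × String)) × List String) : Prop := out = match_required_fields_py_alt columns
instance (columns : List String) (out : (List (String × String)) × List String) : Decidable (Spec_match_required_fields_py columns out) := by unfold Spec_match_required_fields_py; infer_instance

-- ===== CLAIM (what is proved, stated in full; the proofs are below) =====
def Claim_equal_match_required_fields_py : Prop := ∀ (columns : List String), Dom_match_required_fields_py columns → Spec_match_required_fields_py columns (match_required_fields_py columns)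

-- ===== LEMMAS AND PROOFS =====

-- A's dedup loop keeps 'deduped = seen' as lists: it computes Set.ofList of its input.
lemma dedup_fold_pair (l : List String) (s : PySem.Set String) :
    (l.foldl
      (fun (p : List String × PySem.Set String) c =>
        if PySem.Set.contains p.2 c then p else (p.1 ++ [c], PySem.Set.add p.2 c))
      (s, s)) = (PySem.Set.update s l, PySem.Set.update s l) := by
  induction l generalizing s with
  | nil => simp [PySem.Set.update]
  | cons c t ih =>
      simp only [List.foldl_cons]
      by_cases h : c ∈ s
      · have hc : PySem.Set.contains s c = true := by
          simp [PySem.Set.contains_eq_listContains, List.contains_eq_mem, h]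
        rw [if_pos hc, PySem.Set.update_cons, PySem.Set.add_of_mem h]
        exact ih s
      · have hc : PySem.Set.contains s c = false := by
          simp [PySem.Set.contains_eq_listContains, List.contains_eq_mem, h]
        rw [if_neg (by simp [h]), PySem.Set.update_cons, PySem.Set.add_of_not_mem h]
        exact ih (s ++ [c])

lemma dedup_fold_eq (l : List String) :
    (l.foldl
      (fun (p : List String × PySem.Set String) c =>
        if PySem.Set.contains p.2 c then p else (p.1 ++ [c], PySem.Set.add p.2 c))
      ([], [])).1 = PySem.Set.ofList l := by
  rw [dedup_fold_pair l []]
  rfl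

-- B's collect loop likewise, restricted to the acceptable columns.
lemma collect_fold_pair (q : String → Bool) (l : List String) (s : PySem.Set String) :
    (l.foldl
      (fun (p : List String × PySem.Set String) col =>
        if q col && !(PySem.Set.contains p.2 col)
        then (p.1 ++ [col], PySem.Set.add p.2 col) else p)
      (s, s)) = (PySem.Set.update s (l.filter q), PySem.Set.update s (l.filter q)) := by
  induction l generalizing s with
  | nil => simp [PySem.Set.update]
  | cons c t ih =>
      simp only [List.foldl_cons]
      by_cases hq : q c
      · by_cases h : c ∈ s
        · have hc : PySem.Set.contains s c = true := by
            simp [PySem.Set.contains_eq_listContains, List.contains_eq_mem, h]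
          rw [if_neg (by simp [hq, h]), List.filter_cons_of_pos hq, PySem.Set.update_cons,
            PySem.Set.add_of_mem h]
          exact ih s
        · have hc : PySem.Set.contains s c = false := by
            simp [PySem.Set.contains_eq_listContains, List.contains_eq_mem, h]
          rw [if_pos (by simp [hq, h]), List.filter_cons_of_pos hq, PySem.Set.update_cons,
            PySem.Set.add_of_not_mem h]
          exact ih (s ++ [c])
      · have hqf : q c = false := by simpa using hq
        rw [if_neg (by simp [hqf]),
          show List.filter q (c :: t) = List.filter q t from by simp [hqf]]
        exact ih s

lemma collect_fold_eq (q : String → Bool) (l : List String) :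
    (l.foldl
      (fun (p : List String × PySem.Set String) col =>
        if q col && !(PySem.Set.contains p.2 col)
        then (p.1 ++ [col], PySem.Set.add p.2 col) else p)
      ([], [])).1 = PySem.Set.ofList (l.filter q) := by
  rw [collect_fold_pair q l []]
  rfl

-- the inverted index, read back: its bucket at k is the filter of columns (default [] otherwise)
lemma c2c_getD (columns : List String) (k : String) :
    (buildC2C columns).getD k [] = columns.filter (fun c => canonicalKey c == k) := by
  unfold buildC2C
  have hfold : columns.foldl (fun d col => d.modify (canonicalKey col) [] (fun l => l ++ [col]))
        PySem.Dict.empty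
      = (columns.map (fun c => ((canonicalKey c : String), c))).foldl
          (fun (d : PySem.Dict String (List String)) (p : String × String) => d.modify p.1 [] (fun l => l ++ [p.2]))
          PySem.Dict.empty :=
    (List.foldl_map (f := fun (c : String) => ((canonicalKey c : String), c))
      (g := fun (d : PySem.Dict String (List String)) (p : String × String) => d.modify p.1 [] (fun l => l ++ [p.2]))).symm
  rw [hfold, PySem.Dict.getD_foldl_modify_append]
  simp [List.filter_map, Function.comp_def, List.map_map]

lemma grp_eq (columns : List String) (k : String) :
    (if (buildC2C columns).contains k then (buildC2C columns).getD k [] else [])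
      = columns.filter (fun c => canonicalKey c == k) := by
  by_cases h : (buildC2C columns).contains k
  · rw [if_pos h, c2c_getD]
  · rw [if_neg h, ← c2c_getD columns k,
      PySem.Dict.getD_of_not_contains (buildC2C columns) [] (by simpa using h)]

-- A's candidate list for a field, in closed form
lemma candsA_eq (columns : List String) (field : String) :
    ((aliasMap.getD field []).foldl
        (fun acc a =>
          if (buildC2C columns).contains a then acc ++ (buildC2C columns).getD a [] else acc)
        (if (buildC2C columns).contains (canonicalKey field) then
           [] ++ (buildC2C columns).getD (canonicalKey field) []
         else []))
    = columns.filter (fun c => canonicalKey c == canonicalKey field)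
      ++ (aliasMap.getD field []).flatMap
           (fun a => columns.filter (fun c => canonicalKey c == a)) := by
  have hstep : ∀ (acc : List String) (a : String), a ∈ aliasMap.getD field [] →
      (if (buildC2C columns).contains a then acc ++ (buildC2C columns).getD a [] else acc)
      = acc ++ columns.filter (fun c => canonicalKey c == a) := by
    intro acc a _
    rw [← grp_eq columns a]
    split <;> simp
  calc ((aliasMap.getD field []).foldl
        (fun acc a =>
          if (buildC2C columns).contains a then acc ++ (buildC2C columns).getD a [] else acc)
        (if (buildC2C columns).contains (canonicalKey field) then
           [] ++ (buildC2C columns).getD (canonicalKey field) []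
         else []))
      = (aliasMap.getD field []).foldl
          (fun acc a => acc ++ columns.filter (fun c => canonicalKey c == a))
          (columns.filter (fun c => canonicalKey c == canonicalKey field)) := by
        rw [show (if (buildC2C columns).contains (canonicalKey field) then
             [] ++ (buildC2C columns).getD (canonicalKey field) []
           else []) = columns.filter (fun c => canonicalKey c == canonicalKey field) from by
          rw [← grp_eq columns (canonicalKey field)]; split <;> simp]
        exact PySem.List.foldl_congr_mem _ _ _ _ hstep
    _ = _ := PySem.List.foldl_append_eq_flatMap _ _ _

-- per-field: A's loop body equals B's loop body
lemma step_eq (columns : List String) (m : PySem.Dict String String) (field : String) :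
    stepA (buildC2C columns) columns m field = stepB columns m field := by
  unfold stepA stepB
  by_cases hin : field ∈ columns
  · simp [hin]
  have hin' : ¬(columns.contains field = true) := by simp [hin]
  rw [if_neg hin']
  simp only [dedup_fold_eq, collect_fold_eq, candsA_eq]
  -- the two deduped lists are permutations of each other
  have hperm :
      (PySem.Set.ofList
          (columns.filter (fun c => canonicalKey c == canonicalKey field)
            ++ (aliasMap.getD field []).flatMap
                 (fun a => columns.filter (fun c => canonicalKey c == a)))).Perm
        (PySem.Set.ofList (columns.filter (fun col =>
          PySem.Set.contains (PySem.Set.ofList (canonicalKey field :: aliasMap.getD field []))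
            (canonicalKey col)))) := by
    apply (List.perm_ext_iff_of_nodup (PySem.Set.nodup_ofList _) (PySem.Set.nodup_ofList _)).mpr
    intro x
    simp only [PySem.Set.mem_ofList, List.mem_append, List.mem_filter, List.mem_flatMap,
      PySem.Set.contains_eq_listContains, List.contains_eq_mem, PySem.Set.mem_ofList,
      List.mem_cons, decide_eq_true_eq, beq_iff_eq]
    constructor
    · rintro (⟨hx, hk⟩ | ⟨a, ha, hx, hk⟩)
      · exact ⟨hx, Or.inl hk⟩
      · exact ⟨hx, Or.inr (hk ▸ ha)⟩
    · rintro ⟨hx, hk | hk⟩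
      · exact Or.inl ⟨hx, hk⟩
      · exact Or.inr ⟨canonicalKey x, hk, hx, rfl⟩
  generalize hLA : PySem.Set.ofList
      (columns.filter (fun c => canonicalKey c == canonicalKey field)
        ++ (aliasMap.getD field []).flatMap
             (fun a => columns.filter (fun c => canonicalKey c == a))) = LA at hperm ⊢
  generalize hLB : PySem.Set.ofList (columns.filter (fun col =>
      PySem.Set.contains (PySem.Set.ofList (canonicalKey field :: aliasMap.getD field []))
        (canonicalKey col))) = LB at hperm ⊢
  cases LB with
  | nil => rw [List.perm_nil.mp hperm]; simp [hin]
  | cons c t =>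
      cases t with
      | nil =>
          rw [List.perm_singleton.mp hperm]
          simp [hin, PySem.List.pyGetD_zero_cons]
      | cons c₂ t₂ =>
          have hlen : LA.length = t₂.length + 1 + 1 := by
            rw [hperm.length_eq]; simp
          rw [show (LA.length == 1) = false from by
            rw [hlen]; simp only [beq_eq_false_iff_ne, ne_eq]; omega]
          simp [hin]

-- ===== VERDICT (by name: the statement is the Claim_ definition above) =====
theorem match_required_fields_py_spec : Claim_equal_match_required_fields_py := by
  intro columns _
  unfold Spec_match_required_fields_py match_required_fields_py match_required_fields_py_alt
  have key : List.foldl (stepA (buildC2C columns) columns) PySem.Dict.empty logicalFields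
      = List.foldl (stepB columns) PySem.Dict.empty logicalFields :=
    PySem.List.foldl_congr_mem _ _ _ _ (fun m field _ => step_eq columns m field)
  simp only [key]
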